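-- pv_equiv track=rewrite | github.com/montoliu/assembler | assembler.py | deal_with_variables
-- ===== SOURCE A (Python) =====
-- def deal_with_variables(asm_code):
--     variables = {"SP": 0, "LCL": 1, "ARG": 2, "THIS": 3, "THAT": 4, "R0": 0, "R1": 1, "R2": 2, "R3": 3, "R4": 4,
--                  "R5": 5, "R6": 6, "R7": 7, "R8": 8, "R9": 9, "R10": 10, "R11": 11, "R12": 12, "R13": 13, "R14": 14,
--                  "R15": 15, "SCREEN": 16384, "KBD": 24576}
--
--     # look for variables
--     ram = 16
--     for line in asm_code:
--         if line[0] == "@":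
--             label = line[1:len(line)]
--             if not label.lstrip("-").isnumeric() and label not in variables:
--                 variables[label] = ram
--                 ram += 1
--
--     # replace variables for ram positions
--     new_asm_code = []
--     for line in asm_code:
--         if line[0] == "@":
--             label = line[1:len(line)]
--             if label in variables:
--                 new_asm_code.append("@" + str(variables[label]))
--             else:
--                 new_asm_code.append(line[:])
--         else:
--             new_asm_code.append(line[:])
--
--     return new_asm_code
-- ===== SOURCE B (Python) =====
-- def deal_with_variables(asm_code):
--     # Single pass: the symbol table and the rewritten output are built together.
--     variables = {"SP": 0, "LCL": 1, "ARG": 2, "THIS": 3, "THAT": 4, "R0": 0, "R1": 1, "R2": 2, "R3": 3, "R4": 4,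
--                  "R5": 5, "R6": 6, "R7": 7, "R8": 8, "R9": 9, "R10": 10, "R11": 11, "R12": 12, "R13": 13, "R14": 14,
--                  "R15": 15, "SCREEN": 16384, "KBD": 24576}
--     ram = 16
--     out = []
--     for line in asm_code:
--         if line.startswith("@"):
--             label = line[1:]
--             if not label.lstrip("-").isnumeric() and label not in variables:
--                 variables[label] = ram
--                 ram += 1
--             out.append("@" + str(variables[label]) if label in variables else line)
--         else:
--             out.append(line)
--     return out
-- ===== Notes on version B (the rewrite author's own statement) =====
-- stated objective: alternative
-- what changed: B fuses A's two traversals (collect all variables, then rewrite) into a single pass that assigns a fresh RAM slot and emits the rewritten line together, correct because a label's address is fixed at its first occurrence and never changes.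
-- crash fix: A raises IndexError (line[0]) whenever asm_code contains an empty string; B's startswith test simply copies such a line through. — e.g. on deal_with_variables([""]): A raises IndexError, B returns [""]
import Mathlib
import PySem

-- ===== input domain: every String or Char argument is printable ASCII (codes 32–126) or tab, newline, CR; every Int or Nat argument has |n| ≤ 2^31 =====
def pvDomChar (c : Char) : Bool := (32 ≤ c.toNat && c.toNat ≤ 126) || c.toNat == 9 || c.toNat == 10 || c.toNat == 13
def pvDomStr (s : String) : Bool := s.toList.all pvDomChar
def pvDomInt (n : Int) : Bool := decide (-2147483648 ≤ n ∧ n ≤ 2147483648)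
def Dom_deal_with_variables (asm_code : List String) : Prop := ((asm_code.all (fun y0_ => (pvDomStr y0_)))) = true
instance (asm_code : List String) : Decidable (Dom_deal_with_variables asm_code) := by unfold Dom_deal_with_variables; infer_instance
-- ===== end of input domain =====

-- B fuses A's two loops (collect variables, then rewrite) into one pass; same output, same cost (objective: alternative).


-- ===== PORT A =====
-- the predefined symbol table (shared literal of both Pythons)
def pvInitVars : PySem.Dict String Int := PySem.Dict.ofList
  [("SP", 0), ("LCL", 1), ("ARG", 2), ("THIS", 3), ("THAT", 4), ("R0", 0), ("R1", 1), ("R2", 2), ("R3", 3),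
   ("R4", 4), ("R5", 5), ("R6", 6), ("R7", 7), ("R8", 8), ("R9", 9), ("R10", 10), ("R11", 11), ("R12", 12),
   ("R13", 13), ("R14", 14), ("R15", 15), ("SCREEN", 16384), ("KBD", 24576)]

-- label.lstrip("-").isnumeric(): lstrip of the single char "-" is dropWhile (== '-'); isnumeric = isdigit on the ASCII domain
def pvIsNumLabel (label : String) : Bool :=
  PySem.Chars.strIsdigit (label.toList.dropWhile (fun c => c == '-'))

-- the body of A's first loop
def pvCollect (p : PySem.Dict String Int × Int) (line : String) : PySem.Dict String Int × Int :=
  if PySem.Str.pyGet? line 0 = some '@' then      -- line[0] == "@" (empty line: Python raises, excluded by Pre_)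
    let label := PySem.Str.slice line (some 1) (some (PySem.Str.len line))   -- line[1:len(line)]
    if pvIsNumLabel label = false ∧ p.1.contains label = false then
      (p.1.insert label p.2, p.2 + 1)
    else p
  else p

-- the body of A's second loop (the per-line value appended to new_asm_code)
def pvLineOutA (d : PySem.Dict String Int) (line : String) : String :=
  if PySem.Str.pyGet? line 0 = some '@' then
    let label := PySem.Str.slice line (some 1) (some (PySem.Str.len line))
    match d.get? label with
    | some v => String.ofList ('@' :: PySem.Int.toChars v)   -- "@" + str(variables[label])
    | none => line                                        -- line[:]
  else line                                               -- line[:]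

def deal_with_variables (asm_code : List String) : List String :=
  let st := asm_code.foldl pvCollect (pvInitVars, 16)
  asm_code.foldl (fun acc line => acc ++ [pvLineOutA st.1 line]) []

-- ===== PORT B =====
-- the body of B's single loop: state = (variables, ram, out)
def pvStepB (p : PySem.Dict String Int × Int × List String) (line : String) :
    PySem.Dict String Int × Int × List String :=
  if PySem.Str.startswith line "@" then
    let label := PySem.Str.slice line (some 1) none          -- line[1:]
    let dr := if pvIsNumLabel label = false ∧ p.1.contains label = false then
                (p.1.insert label p.2.1, p.2.1 + 1)
              else (p.1, p.2.1)
    (dr.1, dr.2, p.2.2 ++ [if dr.1.contains label then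
        String.ofList ('@' :: PySem.Int.toChars (dr.1.getD label 0)) else line])
  else (p.1, p.2.1, p.2.2 ++ [line])

def deal_with_variables_alt (asm_code : List String) : List String :=
  (asm_code.foldl pvStepB (pvInitVars, 16, [])).2.2

-- ===== PRECONDITION & SPEC =====
-- Pre_ excludes exactly the inputs containing an empty line, on which A raises IndexError at line[0].
def Pre_deal_with_variables (asm_code : List String) : Prop := ∀ l ∈ asm_code, l ≠ ""
instance (asm_code : List String) : Decidable (Pre_deal_with_variables asm_code) := by
  unfold Pre_deal_with_variables; infer_instance

def pvWitness_deal_with_variables : List String := ["@sum", "@5", "D=M", "@sum", "@R3"]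

-- A raises IndexError (line[0]) whenever asm_code contains an empty string; B copies such a line through.
def Raises_deal_with_variables (asm_code : List String) : Prop := "" ∈ asm_code
instance (asm_code : List String) : Decidable (Raises_deal_with_variables asm_code) := by
  unfold Raises_deal_with_variables; infer_instance
def pvRaiseWitness_deal_with_variables : List String := [""]
def pvRaiseWitnessOut_deal_with_variables : List String := [""]

def Spec_deal_with_variables (asm_code : List String) (out : List String) : Prop :=
  out = deal_with_variables_alt asm_code
instance (asm_code : List String) (out : List String) : Decidable (Spec_deal_with_variables asm_code out) := by
  unfold Spec_deal_with_variables; infer_instance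

-- ===== CLAIM (what is proved, stated in full; the proofs are below) =====
def Claim_equal_deal_with_variables : Prop := ∀ (asm_code : List String), Dom_deal_with_variables asm_code → Pre_deal_with_variables asm_code → Spec_deal_with_variables asm_code (deal_with_variables asm_code)

def Claim_raises_deal_with_variables : Prop :=
  (∀ (asm_code : List String), Dom_deal_with_variables asm_code → Raises_deal_with_variables asm_code → ¬ Pre_deal_with_variables asm_code) ∧
  (Dom_deal_with_variables (pvRaiseWitness_deal_with_variables) ∧ Raises_deal_with_variables (pvRaiseWitness_deal_with_variables) ∧ deal_with_variables_alt (pvRaiseWitness_deal_with_variables) = pvRaiseWitnessOut_deal_with_variables)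

-- ===== LEMMAS AND PROOFS =====

-- the two guards agree on every line (on "" both are false; Python A raises there, outside Pre_)
theorem pv_guard_eq (line : String) :
    (PySem.Str.pyGet? line 0 = some '@') ↔ PySem.Str.startswith line "@" = true := by
  rw [PySem.Str.startswith_eq]
  have h0 : PySem.Str.pyGet? line 0 = line.toList[(0:Nat)]? := by
    simpa using PySem.Str.pyGet?_natCast line 0
  rw [h0]
  cases h : line.toList with
  | nil => simp [PySem.Chars.startswith]
  | cons c t =>
      constructor
      · intro hc; simp at hc; simp [PySem.Chars.startswith, hc]
      · intro hc; simp [PySem.Chars.startswith] at hc; simp [hc.symm]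

-- A's label line[1:len(line)] is B's label line[1:]
theorem pv_label_eq (line : String) :
    PySem.Str.slice line (some 1) (some (PySem.Str.len line)) =
      PySem.Str.slice line (some 1) none := by
  rw [← String.toList_inj, PySem.Str.toList_slice, PySem.Str.toList_slice, PySem.Str.len_eq]
  have h1 : (1:Int) = ((1:Nat):Int) := by norm_num
  unfold PySem.Chars.slice
  rw [h1, PySem.List.slice_natCast, PySem.List.slice_from_natCast]
  exact List.take_of_length_le (by simp)

-- invariant: no key of the table is a "numeric" label
def pvInv (d : PySem.Dict String Int) : Prop := ∀ k ∈ d.keys, pvIsNumLabel k = false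

theorem pvInv_init : pvInv pvInitVars := by
  intro k hk
  unfold pvInitVars at hk
  fin_cases hk <;> decide

theorem pvInv_collect (p : PySem.Dict String Int × Int) (line : String) (h : pvInv p.1) :
    pvInv (pvCollect p line).1 := by
  unfold pvCollect
  dsimp only
  split_ifs with hg hc
  · intro k hk
    rcases (PySem.Dict.mem_keys_insert _ _ _ _).mp hk with rfl | hk'
    · exact hc.1
    · exact h k hk'
  · exact h
  · exact h

theorem pvInv_foldl (lines : List String) (p : PySem.Dict String Int × Int) (h : pvInv p.1) :
    pvInv ((lines.foldl pvCollect p).1) := by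
  induction lines generalizing p with
  | nil => exact h
  | cons line rest ih => exact ih (pvCollect p line) (pvInv_collect p line h)

-- once a key is bound, later lines never change its value
theorem pv_get?_stable (lines : List String) (p : PySem.Dict String Int × Int) (k : String) (v : Int)
    (h : p.1.get? k = some v) : ((lines.foldl pvCollect p).1).get? k = some v := by
  induction lines generalizing p with
  | nil => exact h
  | cons line rest ih =>
      refine ih (pvCollect p line) ?_
      unfold pvCollect
      dsimp only
      split_ifs with hg hc
      · have hkne : k ≠ PySem.Str.slice line (some 1) (some (PySem.Str.len line)) := by
          intro he
          rw [← he] at hc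
          rw [PySem.Dict.contains_eq_isSome_get?, h] at hc
          simp at hc
        rw [PySem.Dict.get?_insert_of_ne p.1 p.2 hkne]; exact h
      · exact h
      · exact h

-- B's per-line output, computed from the table right after collecting this line
def pvEltB (d : PySem.Dict String Int) (line : String) : String :=
  if PySem.Str.startswith line "@" then
    let label := PySem.Str.slice line (some 1) none
    if d.contains label then String.ofList ('@' :: PySem.Int.toChars (d.getD label 0)) else line
  else line

theorem pvStepB_eq (p : PySem.Dict String Int × Int) (out : List String) (line : String) :
    pvStepB (p.1, p.2, out) line =
      ((pvCollect p line).1, (pvCollect p line).2, out ++ [pvEltB (pvCollect p line).1 line]) := by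
  by_cases hg : PySem.Str.startswith line "@" = true
  · have hget : PySem.Str.pyGet? line 0 = some '@' := (pv_guard_eq line).mpr hg
    unfold pvStepB pvCollect pvEltB
    dsimp only
    rw [if_pos hg, if_pos hget, pv_label_eq line]
    split_ifs <;> rfl
  · have hget : ¬ PySem.Str.pyGet? line 0 = some '@' := fun hc => hg ((pv_guard_eq line).mp hc)
    unfold pvStepB pvCollect pvEltB
    dsimp only
    rw [if_neg hg, if_neg hget, if_neg hg]

-- the line's output is the same whether computed now (B) or from the final table (A)
theorem pv_elt_eq (line : String) (p : PySem.Dict String Int × Int) (rest : List String)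
    (h : pvInv p.1) :
    pvEltB (pvCollect p line).1 line =
      pvLineOutA ((rest.foldl pvCollect (pvCollect p line)).1) line := by
  have hinv1 : pvInv (pvCollect p line).1 := pvInv_collect p line h
  have hinvf : pvInv ((rest.foldl pvCollect (pvCollect p line)).1) :=
    pvInv_foldl rest _ hinv1
  by_cases hg : PySem.Str.startswith line "@" = true
  · have hget : PySem.Str.pyGet? line 0 = some '@' := (pv_guard_eq line).mpr hg
    unfold pvEltB pvLineOutA
    dsimp only
    rw [if_pos hg, if_pos hget, pv_label_eq line]
    by_cases hn : pvIsNumLabel (PySem.Str.slice line (some 1) none) = true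
    · -- numeric label: never in the table
      have hc1 : (pvCollect p line).1.contains (PySem.Str.slice line (some 1) none) = false := by
        by_contra hcc
        have hmem := (PySem.Dict.contains_iff_mem_keys _ _).mp (by simpa using hcc)
        have := hinv1 _ hmem
        rw [hn] at this
        exact absurd this (by simp)
      have hcf : ((rest.foldl pvCollect (pvCollect p line)).1).contains
          (PySem.Str.slice line (some 1) none) = false := by
        by_contra hcc
        have hmem := (PySem.Dict.contains_iff_mem_keys _ _).mp (by simpa using hcc)
        have := hinvf _ hmem
        rw [hn] at this
        exact absurd this (by simp)
      rw [if_neg (by simp [hc1]), (PySem.Dict.get?_eq_none_iff_contains _ _).mpr hcf]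
    · -- non-numeric label: bound after this line, value stable to the end
      have hnum : pvIsNumLabel (PySem.Str.slice line (some 1) none) = false := by
        simpa using hn
      have hsome : ∃ v, (pvCollect p line).1.get? (PySem.Str.slice line (some 1) none) = some v := by
        unfold pvCollect
        dsimp only
        rw [if_pos hget, pv_label_eq line]
        by_cases hc : p.1.contains (PySem.Str.slice line (some 1) none) = false
        · rw [if_pos ⟨hnum, hc⟩]
          exact ⟨p.2, PySem.Dict.get?_insert_self _ _ _⟩
        · rw [if_neg (fun hand => hc hand.2)]
          have : (p.1.get? (PySem.Str.slice line (some 1) none)).isSome := by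
            rw [← PySem.Dict.contains_eq_isSome_get?]
            simpa using hc
          exact ⟨_, Option.eq_some_of_isSome this⟩
      obtain ⟨v, hv⟩ := hsome
      have hvf := pv_get?_stable rest (pvCollect p line) _ v hv
      have hc1 : (pvCollect p line).1.contains (PySem.Str.slice line (some 1) none) = true := by
        rw [PySem.Dict.contains_eq_isSome_get?, hv]; rfl
      rw [if_pos hc1, hvf, PySem.Dict.getD_of_get?_eq_some _ _ hv]
  · have hget : ¬ PySem.Str.pyGet? line 0 = some '@' := fun hc => hg ((pv_guard_eq line).mp hc)
    unfold pvEltB pvLineOutA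
    dsimp only
    rw [if_neg hg, if_neg hget]

theorem pv_main (lines : List String) (d : PySem.Dict String Int) (r : Int) (out : List String)
    (h : pvInv d) :
    (lines.foldl pvStepB (d, r, out)).2.2 =
      out ++ lines.map (pvLineOutA ((lines.foldl pvCollect (d, r)).1)) := by
  induction lines generalizing d r out with
  | nil => simp
  | cons line rest ih =>
      rw [List.foldl_cons, List.foldl_cons, pvStepB_eq (d, r) out line,
        ih (pvCollect (d, r) line).1 (pvCollect (d, r) line).2 _ (pvInv_collect (d, r) line h)]
      rw [List.map_cons, pv_elt_eq line (d, r) rest h]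
      simp

-- ===== VERDICT (by name: the statement is the Claim_ definition above) =====
theorem deal_with_variables_spec : Claim_equal_deal_with_variables := by
  intro asm _ _
  unfold Spec_deal_with_variables deal_with_variables deal_with_variables_alt
  rw [PySem.List.foldl_append_singleton_eq_map, pv_main asm pvInitVars 16 [] pvInv_init]


@[simp]
theorem deal_with_variables_raises : Claim_raises_deal_with_variables := by
  unfold Claim_raises_deal_with_variables
  constructor
  · intro asm _ hr hp; exact hp "" hr rfl
  · decide
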